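-- pv_equiv track=rewrite | github.com/akovchegin/algorithms-templates | python/academy_training/A/acid.py | level_up
-- ===== SOURCE A (Python) =====
-- def level_up(n, arr):
--     max = arr[0]
--     min = arr[0]
--     max_pos = 0
--     for i in range(1,len(arr)):
--         if arr[i] >= max:
--             max = arr[i]
--             max_pos = i
--         if arr[i] < min:
--             min = arr[i]
--     if max_pos != n-1:
--         return -1
--     return max-min
-- ===== SOURCE B (Python) =====
-- def level_up(n, arr):
--     s = sorted(arr)
--     if 0 <= n - 1 < len(arr) and arr[n - 1] == s[-1] and s[-1] not in arr[n:]: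
--         return s[-1] - s[0]
--     return -1
-- ===== Notes on version B (the rewrite author's own statement) =====
-- stated objective: alternative
-- what changed: Instead of one index loop tracking running max/min/last-max-position, B sorts a copy to read the extremes off the ends and decides 'max is last at position n-1' by testing arr[n-1] == max and absence of the max in the suffix arr[n:].
import Mathlib
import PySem

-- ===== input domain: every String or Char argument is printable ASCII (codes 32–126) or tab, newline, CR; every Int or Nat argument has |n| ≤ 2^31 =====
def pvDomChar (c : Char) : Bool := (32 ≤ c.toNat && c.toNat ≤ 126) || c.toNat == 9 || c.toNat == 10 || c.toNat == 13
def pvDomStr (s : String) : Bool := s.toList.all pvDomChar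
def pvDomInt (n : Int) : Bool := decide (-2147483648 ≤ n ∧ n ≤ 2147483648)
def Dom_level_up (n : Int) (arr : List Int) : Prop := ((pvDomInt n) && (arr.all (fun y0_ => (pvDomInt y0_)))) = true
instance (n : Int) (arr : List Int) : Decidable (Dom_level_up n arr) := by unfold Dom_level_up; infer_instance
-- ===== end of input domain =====

-- B sorts a copy to read max/min off the ends and checks 'last max position = n-1' via
-- arr[n-1] == max and max ∉ arr[n:], instead of A's single index loop (alternative decomposition).

-- ===== PORT A =====
-- loop body of A's for-loop: state (max, min, max_pos)
def levelUpStep (arr : List Int) (s : Int × Int × Int) (i : Int) : Int × Int × Int :=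
  let v := PySem.List.pyGetD arr i 0   -- arr[i]; i is always in range (1 ≤ i < len(arr))
  let s1 := if s.1 ≤ v then (v, s.2.1, i) else s      -- if arr[i] >= max: max, max_pos updated
  if v < s1.2.1 then (s1.1, v, s1.2.2) else s1        -- if arr[i] < min: min updated

def level_up (n : Int) (arr : List Int) : Int :=
  match PySem.List.pyGet? arr 0 with
  | none => -1   -- unreachable: arr[0] raises IndexError on []; Pre_ excludes the empty list
  | some a0 =>
    let st := (PySem.List.pyRange 1 (arr.length : Int) 1).foldl (levelUpStep arr) (a0, a0, 0)
    if st.2.2 ≠ n - 1 then -1 else st.1 - st.2.1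

-- ===== PORT B =====
def level_up_alt (n : Int) (arr : List Int) : Int :=
  let s := PySem.List.sorted arr (fun y => y) false
  -- under the short-circuited bounds guard all indices are in range, so pyGetD _ _ 0 is exact
  if 0 ≤ n - 1 ∧ n - 1 < (arr.length : Int)
      ∧ PySem.List.pyGetD arr (n - 1) 0 = PySem.List.pyGetD s (-1) 0
      ∧ PySem.List.pyGetD s (-1) 0 ∉ PySem.List.slice arr (some n) none
  then PySem.List.pyGetD s (-1) 0 - PySem.List.pyGetD s 0 0
  else -1

-- ===== PRECONDITION & SPEC =====
-- Pre_ excludes exactly the empty list, on which A raises IndexError at arr[0].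
def Pre_level_up (n : Int) (arr : List Int) : Prop := arr ≠ []
instance (n : Int) (arr : List Int) : Decidable (Pre_level_up n arr) := by unfold Pre_level_up; infer_instance
def pvWitness_level_up : Int × List Int := (3, [1, 5, 5])

def Spec_level_up (n : Int) (arr : List Int) (out : Int) : Prop := out = level_up_alt n arr
instance (n : Int) (arr : List Int) (out : Int) : Decidable (Spec_level_up n arr out) := by unfold Spec_level_up; infer_instance

-- ===== CLAIM (what is proved, stated in full; the proofs are below) =====
def Claim_equal_level_up : Prop := ∀ (n : Int) (arr : List Int), Dom_level_up n arr → Pre_level_up n arr → Spec_level_up n arr (level_up n arr)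

-- ===== LEMMAS AND PROOFS =====

-- the running maximum belongs to the list
lemma runmax_mem (a : Int) (t : List Int) : t.foldl max a ∈ a :: t := by
  rcases PySem.List.foldl_max_mem t a with h | h
  · rw [h]; exact List.mem_cons_self ..
  · exact List.mem_cons_of_mem _ h

-- main invariant: A's fold computes (max, min, last-max-position via the reverse index)
lemma levelUp_fold_inv (a : Int) (t : List Int) :
    (PySem.List.pyRange 1 (((a :: t).length : Int)) 1).foldl (levelUpStep (a :: t)) (a, a, 0)
    = (t.foldl max a, t.foldl min a,
       (((a :: t).length : Int)) - 1
         - (((PySem.List.index? (a :: t).reverse (t.foldl max a)).getD 0 : Nat) : Int)) := by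
  induction t using List.reverseRecOn with
  | nil =>
      simp [PySem.List.pyRange_one_eq_nil]
  | append_singleton t x ih =>
      have hlen : (((a :: (t ++ [x])).length : Int)) = ((a :: t).length : Int) + 1 := by
        simp
      have hge1 : (1 : Int) ≤ ((a :: t).length : Int) := by
        have : 1 ≤ (a :: t).length := by simp
        exact_mod_cast this
      rw [hlen, PySem.List.pyRange_one_succ_right hge1, List.foldl_append]
      -- the prefix fold over a::(t++[x]) agrees with the fold over a::t
      have hcong :
          (PySem.List.pyRange 1 (((a :: t).length : Int)) 1).foldl (levelUpStep (a :: (t ++ [x]))) (a, a, 0)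
          = (PySem.List.pyRange 1 (((a :: t).length : Int)) 1).foldl (levelUpStep (a :: t)) (a, a, 0) := by
        apply PySem.List.foldl_congr_mem
        intro s i hi
        have hmem := (PySem.List.mem_pyRange_one).1 hi
        have h0 : 0 ≤ i := by omega
        have hlt1 : i < ((a :: t).length : Int) := hmem.2
        have hlt2 : i < ((a :: (t ++ [x])).length : Int) := by rw [hlen]; omega
        have hltN : i.toNat < (a :: t).length := by omega
        unfold levelUpStep
        have hg : PySem.List.pyGetD (a :: (t ++ [x])) i 0 = PySem.List.pyGetD (a :: t) i 0 := by
          rw [PySem.List.pyGetD_eq_getElem (a :: (t ++ [x])) 0 h0 hlt2,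
              PySem.List.pyGetD_eq_getElem (a :: t) 0 h0 hlt1]
          rw [List.getElem_of_eq (show (a :: (t ++ [x])) = (a :: t) ++ [x] by simp)]
          exact List.getElem_append_left hltN
        rw [hg]
      rw [hcong, ih]
      -- the last step processes index (a::t).length, whose element is x
      have hv : PySem.List.pyGetD (a :: (t ++ [x])) (((a :: t).length : Int)) 0 = x := by
        have hlt : (((a :: t).length : Int)) < ((a :: (t ++ [x])).length : Int) := by
          rw [hlen]; omega
        rw [PySem.List.pyGetD_eq_getElem (a :: (t ++ [x])) 0 (by positivity) hlt]
        rw [List.getElem_of_eq (show (a :: (t ++ [x])) = (a :: t) ++ [x] by simp)]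
        simp
      simp only [List.foldl_cons, List.foldl_nil, levelUpStep, hv]
      have hrev : (a :: (t ++ [x])).reverse = x :: (a :: t).reverse := by simp
      have hmin : (t ++ [x]).foldl min a = if x < t.foldl min a then x else t.foldl min a := by
        rw [List.foldl_append]
        simp only [List.foldl_cons, List.foldl_nil, min_def]
        split_ifs with h1 h2 h2 <;> omega
      by_cases hmx : t.foldl max a ≤ x
      · -- new maximum at the end: last position becomes the new index
        have hmax : (t ++ [x]).foldl max a = x := by
          rw [List.foldl_append]; simp [max_eq_right hmx]
        have hidx : PySem.List.index? (a :: (t ++ [x])).reverse ((t ++ [x]).foldl max a) = some 0 := by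
          rw [hrev, hmax, PySem.List.index?_cons_self]
        rw [hidx, hmax, hmin]
        by_cases hmn : x < t.foldl min a <;> simp [hmx, hmn]
      · -- maximum unchanged: last position shifts by one in the reverse
        have hxlt : x < t.foldl max a := by omega
        have hmax : (t ++ [x]).foldl max a = t.foldl max a := by
          rw [List.foldl_append]; simp [max_eq_left (le_of_lt hxlt)]
        obtain ⟨k, hk⟩ : ∃ k, PySem.List.index? (a :: t).reverse (t.foldl max a) = some k := by
          have hm : t.foldl max a ∈ (a :: t).reverse := by
            rw [List.mem_reverse]; exact runmax_mem a t
          exact Option.isSome_iff_exists.1 ((PySem.List.index?_isSome_iff _ _).2 hm)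
        have hidx : PySem.List.index? (a :: (t ++ [x])).reverse ((t ++ [x]).foldl max a)
            = some (k + 1) := by
          rw [hrev, hmax, PySem.List.index?_cons_of_ne _ (by omega : x ≠ t.foldl max a), hk]
          rfl
        rw [hidx, hmax, hmin, hk]
        by_cases hmn : x < t.foldl min a <;> simp [hmn, not_le.2 hxlt]

-- sorted extremes: the last element of sorted(arr) is the running max, the first is the running min
lemma sorted_last_eq_max (a : Int) (t : List Int) :
    PySem.List.pyGetD (PySem.List.sorted (a :: t) (fun y => y) false) (-1) 0 = t.foldl max a := by
  have hsne : PySem.List.sorted (a :: t) (fun y => y) false ≠ [] := by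
    intro h
    exact List.cons_ne_nil a t ((PySem.List.sorted_eq_nil_iff (a :: t) (fun y => y) false).1 h)
  rw [PySem.List.pyGetD_neg_one _ _ hsne, List.getLast_eq_getElem hsne]
  have hperm := PySem.List.sorted_perm (a :: t) (fun y => y) false
  have hub : ∀ y ∈ a :: t, y ≤ t.foldl max a := by
    intro y hy
    rcases List.mem_cons.1 hy with rfl | hy
    · exact (PySem.List.le_foldl_max t y).1
    · exact (PySem.List.le_foldl_max t a).2 y hy
  refine le_antisymm (hub _ (hperm.mem_iff.1 (List.getElem_mem _))) ?_
  obtain ⟨q, hq, hql⟩ := List.mem_iff_getElem.1 (hperm.mem_iff.2 (runmax_mem a t))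
  exact le_of_eq_of_le hql.symm
    (PySem.List.key_sorted_getElem_mono (a :: t) (fun y => y) (by omega) (by omega))

lemma sorted_head_eq_min (a : Int) (t : List Int) :
    PySem.List.pyGetD (PySem.List.sorted (a :: t) (fun y => y) false) 0 0 = t.foldl min a := by
  have hlen : 0 < (PySem.List.sorted (a :: t) (fun y => y) false).length := by
    rcases h : PySem.List.sorted (a :: t) (fun y => y) false with _ | _
    · exact absurd ((PySem.List.sorted_eq_nil_iff (a :: t) (fun y => y) false).1 h)
        (List.cons_ne_nil a t)
    · simp
  rw [PySem.List.pyGetD_eq_getElem _ _ (by omega) (by exact_mod_cast hlen)]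
  have hperm := PySem.List.sorted_perm (a :: t) (fun y => y) false
  have hlb : ∀ y ∈ a :: t, t.foldl min a ≤ y := by
    intro y hy
    rcases List.mem_cons.1 hy with rfl | hy
    · exact (PySem.List.foldl_min_le t y).1
    · exact (PySem.List.foldl_min_le t a).2 y hy
  have hminmem : t.foldl min a ∈ PySem.List.sorted (a :: t) (fun y => y) false := by
    rw [hperm.mem_iff]
    rcases PySem.List.foldl_min_mem t a with h | h
    · rw [h]; exact List.mem_cons_self ..
    · exact List.mem_cons_of_mem _ h
  refine le_antisymm ?_ (hlb _ (hperm.mem_iff.1 (List.getElem_mem _)))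
  obtain ⟨q, hq, hql⟩ := List.mem_iff_getElem.1 hminmem
  exact le_of_le_of_eq
    (PySem.List.key_sorted_getElem_mono (a :: t) (fun y => y) (by omega) hq) hql

-- the position condition: 'len-1 - reverse-index-of-max = n-1' ↔ B's guard
lemma pos_cond_iff (n : Int) (a : Int) (t : List Int) (r : Nat)
    (hk : PySem.List.index? (a :: t).reverse (t.foldl max a) = some r) :
    ((((a :: t).length : Int)) - 1 - (r : Int) = n - 1)
    ↔ (0 ≤ n - 1 ∧ n - 1 < (((a :: t).length : Int))
        ∧ PySem.List.pyGetD (a :: t) (n - 1) 0 = t.foldl max a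
        ∧ t.foldl max a ∉ PySem.List.slice (a :: t) (some n) none) := by
  obtain ⟨hr, hrev, hbef⟩ := PySem.List.getElem_of_index?_eq_some hk
  rw [List.length_reverse] at hr
  rw [List.getElem_reverse] at hrev
  -- p := len - 1 - r is the LAST index of the maximum in a :: t
  have hpL : (a :: t).length - 1 - r < (a :: t).length := by omega
  have hafter : ∀ i (hi : i < (a :: t).length), (a :: t).length - 1 - r < i →
      (a :: t)[i]'hi ≠ t.foldl max a := by
    intro i hi hpi hcon
    have hj : (a :: t).length - 1 - i < r := by omega
    have hb := hbef ((a :: t).length - 1 - i) hj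
    rw [List.getElem_reverse] at hb
    exact hb ((getElem_congr rfl
      (show ((a :: t).length - 1 - ((a :: t).length - 1 - i)) = i from by omega)
      (by omega : (a :: t).length - 1 - ((a :: t).length - 1 - i) < (a :: t).length)).trans hcon)
  constructor
  · intro h
    have h0 : 0 ≤ n - 1 := by omega
    have h1 : n - 1 < (((a :: t).length : Int)) := by omega
    refine ⟨h0, h1, ?_, ?_⟩
    · rw [PySem.List.pyGetD_eq_getElem _ _ h0 (by simpa using h1)]
      exact (getElem_congr rfl
        (show (n - 1).toNat = (a :: t).length - 1 - r from by omega)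
        (by omega : (n - 1).toNat < (a :: t).length)).trans hrev
    · rw [PySem.List.slice_from _ (by omega : (0:Int) ≤ n)]
      intro hmem
      obtain ⟨j, hjl, hje⟩ := List.mem_iff_getElem.1 hmem
      rw [List.getElem_drop] at hje
      have hlt : n.toNat + j < (a :: t).length := by
        have := hjl; rw [List.length_drop] at this; omega
      exact hafter (n.toNat + j) hlt (by omega) hje
  · rintro ⟨h0, h1, h2, h3⟩
    rw [PySem.List.pyGetD_eq_getElem _ _ h0 (by simpa using h1)] at h2
    have hqL : (n - 1).toNat < (a :: t).length := by simpa using h1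
    rw [PySem.List.slice_from _ (by omega : (0:Int) ≤ n)] at h3
    rcases lt_trichotomy ((n - 1).toNat) ((a :: t).length - 1 - r) with hlt | heq | hgt
    · exfalso
      apply h3
      rw [List.mem_iff_getElem]
      refine ⟨(a :: t).length - 1 - r - n.toNat, by rw [List.length_drop]; omega, ?_⟩
      rw [List.getElem_drop]
      exact (getElem_congr rfl
        (show n.toNat + ((a :: t).length - 1 - r - n.toNat) = (a :: t).length - 1 - r from by omega)
        (by omega : n.toNat + ((a :: t).length - 1 - r - n.toNat) < (a :: t).length)).trans hrev
    · omega
    · exact absurd h2 (hafter ((n - 1).toNat) hqL hgt)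

-- ===== VERDICT (by name: the statement is the Claim_ definition above) =====
theorem level_up_spec : Claim_equal_level_up := by
  intro n arr _ hpre
  cases arr with
  | nil => exact absurd rfl hpre
  | cons a t =>
      unfold Spec_level_up level_up level_up_alt
      rw [show PySem.List.pyGet? (a :: t) (0 : Int) = some a from by
            simp [PySem.List.pyGet?, PySem.List.pyIdx?]]
      obtain ⟨r, hk⟩ : ∃ r, PySem.List.index? (a :: t).reverse (t.foldl max a) = some r := by
        have hm : t.foldl max a ∈ (a :: t).reverse := by
          rw [List.mem_reverse]; exact runmax_mem a t
        exact Option.isSome_iff_exists.1 ((PySem.List.index?_isSome_iff _ _).2 hm)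
      simp only [levelUp_fold_inv, sorted_last_eq_max, sorted_head_eq_min, hk, Option.getD_some]
      by_cases h : (((a :: t).length : Int)) - 1 - (r : Int) = n - 1
      · rw [if_neg (by simpa using h), if_pos ((pos_cond_iff n a t r hk).1 h)]
      · rw [if_pos (by simpa using h), if_neg (fun hc => h ((pos_cond_iff n a t r hk).2 hc))]
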